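-- pv_equiv track=rewrite | github.com/jkc-mycode/Coding_Study | 프로그래머스/1/12982. 예산/예산.py | solution
-- ===== SOURCE A (Python) =====
-- def solution(d, budget):
--     count = 0;
--     d.sort()
--     for i in d:
--         if i <= budget:
--             count += 1
--             budget -= i
--     return count
-- ===== SOURCE B (Python) =====
-- def solution(d, budget):
--     d.sort()
--
--     def fits(k):
--         # do the first k (smallest) requests all fit, each within the remaining budget?
--         s = 0
--         for x in d[:k]:
--             s += x
--             if s > budget:
--                 return False
--         return True
--
--     # binary search for the largest k in [0, len(d)] such that fits(k)
--     lo, hi = 0, len(d)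
--     while lo < hi:
--         mid = (lo + hi + 1) // 2
--         if fits(mid):
--             lo = mid
--         else:
--             hi = mid - 1
--     return lo
-- ===== Notes on version B (the rewrite author's own statement) =====
-- stated objective: alternative
-- what changed: Replaces A's single greedy running-subtraction scan with a binary search over the answer k in [0, len(d)], each probe checking with a predicate fits(k) whether the k smallest requests all fit the budget.
import Mathlib
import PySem

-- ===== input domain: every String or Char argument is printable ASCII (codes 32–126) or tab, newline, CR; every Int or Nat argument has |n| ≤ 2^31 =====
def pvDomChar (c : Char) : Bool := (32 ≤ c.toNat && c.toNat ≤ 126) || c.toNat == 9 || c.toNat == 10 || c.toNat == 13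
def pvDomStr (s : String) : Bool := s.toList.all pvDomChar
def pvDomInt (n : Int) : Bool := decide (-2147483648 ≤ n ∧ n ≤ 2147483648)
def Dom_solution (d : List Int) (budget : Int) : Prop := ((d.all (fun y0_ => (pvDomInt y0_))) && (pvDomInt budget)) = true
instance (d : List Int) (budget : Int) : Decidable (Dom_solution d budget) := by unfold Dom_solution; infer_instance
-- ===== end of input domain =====

-- B replaces A's greedy running-subtraction scan with a binary search for the largest k
-- such that the k smallest requests all fit the budget (objective: alternative, same cost).
-- Both Pythons sort d IN PLACE (d.sort()); the equivalence proved here is about the return value.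

-- ===== PORT A =====
-- for i in d: if i <= budget: count += 1; budget -= i   — state (count, budget)
def solution (d : List Int) (budget : Int) : Int :=
  let s := PySem.List.sorted d (fun x => x) false
  (s.foldl (fun (st : Int × Int) i =>
      if i ≤ st.2 then (st.1 + 1, st.2 - i) else st) (0, budget)).1

-- ===== PORT B =====
-- fits' inner loop: s += x; if s > budget: return False
def fitsGo (budget s : Int) : List Int → Bool
  | [] => true
  | x :: xs => if s + x > budget then false else fitsGo budget (s + x) xs

-- def fits(k): loop over d[:k]
def fits (budget : Int) (d : List Int) (k : Int) : Bool :=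
  fitsGo budget 0 (PySem.List.slice d none (some k))

-- while lo < hi: mid = (lo+hi+1)//2; if fits(mid): lo = mid else hi = mid-1
-- (mid written out inline at each use; the Nat fuel, hi - lo at entry, only makes the
-- recursion structural — each iteration shrinks hi - lo by at least 1, so it never runs out)
def bsearch (budget : Int) (d : List Int) : Nat → Int → Int → Int
  | 0, lo, _ => lo
  | fuel + 1, lo, hi =>
    if lo < hi then
      if fits budget d (PySem.Int.floordiv (lo + hi + 1) 2) then
        bsearch budget d fuel (PySem.Int.floordiv (lo + hi + 1) 2) hi
      else
        bsearch budget d fuel lo (PySem.Int.floordiv (lo + hi + 1) 2 - 1)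
    else lo

def solution_alt (d : List Int) (budget : Int) : Int :=
  let s := PySem.List.sorted d (fun x => x) false
  bsearch budget s s.length 0 (s.length : Int)

-- ===== PRECONDITION & SPEC =====
def Spec_solution (d : List Int) (budget : Int) (out : Int) : Prop := out = solution_alt d budget
instance (d : List Int) (budget : Int) (out : Int) : Decidable (Spec_solution d budget out) := by unfold Spec_solution; infer_instance

-- ===== CLAIM (what is proved, stated in full; the proofs are below) =====
def Claim_equal_solution : Prop := ∀ (d : List Int) (budget : Int), Dom_solution d budget → Spec_solution d budget (solution d budget)

-- ===== LEMMAS AND PROOFS =====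

-- A's loop, decoupled from the count accumulator
def gA (b : Int) : List Int → Int
  | [] => 0
  | i :: t => if i ≤ b then 1 + gA (b - i) t else gA b t

theorem foldA_fst (l : List Int) : ∀ (c b : Int),
    (l.foldl (fun (st : Int × Int) i =>
      if i ≤ st.2 then (st.1 + 1, st.2 - i) else st) (c, b)).1 = c + gA b l := by
  induction l with
  | nil => intro c b; simp [gA]
  | cons x t ih =>
      intro c b
      simp only [List.foldl, gA]
      by_cases h : x ≤ b
      · simp [h, ih]; ring
      · simp [h, ih]

theorem gA_nonneg (l : List Int) : ∀ b, 0 ≤ gA b l := by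
  induction l with
  | nil => intro b; simp [gA]
  | cons x t ih =>
      intro b
      simp only [gA]
      by_cases h : x ≤ b
      · have := ih (b - x); simp [h]; omega
      · simpa [h] using ih b

theorem gA_le_length (l : List Int) : ∀ b, gA b l ≤ (l.length : Int) := by
  induction l with
  | nil => intro b; simp [gA]
  | cons x t ih =>
      intro b
      simp only [gA, List.length_cons]
      by_cases h : x ≤ b
      · have := ih (b - x); simp [h]; omega
      · have := ih b; simp [h]; omega

theorem gA_zero (b : Int) (l : List Int) (h : ∀ i ∈ l, ¬ i ≤ b) : gA b l = 0 := by
  induction l with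
  | nil => rfl
  | cons x t ih =>
      have hx := h x (by simp)
      simp only [gA, if_neg hx]
      exact ih (fun i hi => h i (by simp [hi]))

-- fitsGo over a sorted list checks that EVERY item is taken: it succeeds iff gA counts the whole list
theorem fitsGo_iff (budget : Int) : ∀ (l : List Int), l.Pairwise (· ≤ ·) → ∀ c,
    (fitsGo budget c l = true ↔ gA (budget - c) l = (l.length : Int)) := by
  intro l
  induction l with
  | nil => intro _ c; simp [fitsGo, gA]
  | cons x t ih =>
      intro hs c
      rcases List.pairwise_cons.mp hs with ⟨hx, ht⟩
      simp only [fitsGo, gA, List.length_cons]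
      by_cases h : c + x > budget
      · have hfail : ¬ x ≤ budget - c := by omega
        have hz : gA (budget - c) t = 0 :=
          gA_zero _ _ (fun i hi hle => hfail (le_trans (hx i hi) hle))
        have hlen : (0:Int) ≤ (t.length : Int) := by positivity
        simp only [if_pos h, if_neg hfail, hz]
        constructor
        · intro hfalse; cases hfalse
        · intro hbad; omega
      · have hok : x ≤ budget - c := by omega
        have := ih ht (c + x)
        have harith : budget - (c + x) = budget - c - x := by ring
        simp only [if_neg h, if_pos hok]
        rw [this, harith]
        constructor <;> intro he <;> omega

-- gA on a prefix: A's early-stop count of take m is min m (count of l)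
theorem gA_take (l : List Int) (hs : l.Pairwise (· ≤ ·)) :
    ∀ (m : Nat) (b : Int), gA b (l.take m) = min (m : Int) (gA b l) := by
  induction l with
  | nil =>
      intro m b
      have hnil : gA b ([] : List Int) = 0 := rfl
      rw [List.take_nil, hnil]
      omega
  | cons x t ih =>
      rcases List.pairwise_cons.mp hs with ⟨hx, ht⟩
      intro m b
      cases m with
      | zero =>
          have h0 := gA_nonneg (x :: t) b
          rw [List.take_zero]
          have hnil : gA b ([] : List Int) = 0 := rfl
          rw [hnil]; push_cast; omega
      | succ m' =>
          simp only [List.take_succ_cons, gA]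
          by_cases h : x ≤ b
          · have := ih ht m' (b - x)
            have h1 := gA_nonneg t (b - x)
            simp only [if_pos h, this]
            push_cast; omega
          · have hz : gA b t = 0 :=
              gA_zero _ _ (fun i hi hle => h (le_trans (hx i hi) hle))
            have hz' : gA b (t.take m') = 0 :=
              gA_zero _ _ (fun i hi hle => h (le_trans (hx i (List.mem_of_mem_take hi)) hle))
            simp only [if_neg h, hz, hz']
            push_cast; omega
  
-- fits characterised: for 0 ≤ k ≤ len, fits k ↔ k ≤ gA budget l
theorem fits_iff (budget : Int) (l : List Int) (hs : l.Pairwise (· ≤ ·))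
    (k : Int) (hk0 : 0 ≤ k) (hkn : k ≤ (l.length : Int)) :
    (fits budget l k = true ↔ k ≤ gA budget l) := by
  unfold fits
  rw [PySem.List.slice_to l hk0]
  have htake : ((l.take k.toNat).length : Int) = k := by
    simp [List.length_take]; omega
  have hsort : (l.take k.toNat).Pairwise (· ≤ ·) := hs.sublist (List.take_sublist _ _)
  rw [fitsGo_iff budget _ hsort 0, htake]
  have := gA_take l hs k.toNat budget
  have hb : budget - 0 = budget := by ring
  rw [hb, this]
  omega

-- binary-search loop invariant: with enough fuel, if ans := gA budget l lies in [lo, hi] ⊆ [0, len],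
-- bsearch returns it
theorem bsearch_correct (budget : Int) (l : List Int) (hs : l.Pairwise (· ≤ ·)) :
    ∀ (fuel : Nat) (lo hi : Int), (hi - lo).toNat ≤ fuel → 0 ≤ lo → hi ≤ (l.length : Int) →
      lo ≤ gA budget l → gA budget l ≤ hi → bsearch budget l fuel lo hi = gA budget l := by
  intro fuel
  induction fuel with
  | zero =>
      intro lo hi hN h0 hn hlo hhi
      simp only [bsearch]; omega
  | succ N ih =>
      intro lo hi hN h0 hn hlo hhi
      by_cases h : lo < hi
      · rw [bsearch, if_pos h]
        have hm : PySem.Int.floordiv (lo + hi + 1) 2 = (lo + hi + 1) / 2 :=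
          PySem.Int.floordiv_eq_ediv_of_pos (by omega)
        rw [hm]
        set mid := (lo + hi + 1) / 2 with hmid
        have hb1 : lo < mid := by omega
        have hb2 : mid ≤ hi := by omega
        by_cases hf : fits budget l mid = true
        · have hle : mid ≤ gA budget l :=
            (fits_iff budget l hs mid (by omega) (by omega)).mp hf
          rw [if_pos hf]
          exact ih mid hi (by omega) (by omega) hn hle hhi
        · have hgt : ¬ mid ≤ gA budget l := fun hle =>
            hf ((fits_iff budget l hs mid (by omega) (by omega)).mpr hle)
          rw [if_neg hf]
          exact ih lo (mid - 1) (by omega) h0 (by omega) hlo (by omega)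
      · rw [bsearch, if_neg h]; omega

-- ===== VERDICT (by name: the statement is the Claim_ definition above) =====
theorem solution_spec : Claim_equal_solution := by
  intro d budget _
  unfold Spec_solution solution solution_alt
  simp only []
  rw [foldA_fst]
  have hs : (PySem.List.sorted d (fun x => x) false).Pairwise (· ≤ ·) := by
    simpa using PySem.List.sorted_pairwise (xs := d) (key := fun x => x)
  rw [bsearch_correct budget _ hs (PySem.List.sorted d (fun x => x) false).length
        0 _ (by omega) (by omega) (le_refl _) (gA_nonneg _ _) (gA_le_length _ _)]
  ring
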